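-- pv_equiv track=rewrite | github.com/Miseca/log_reader | logReader.py | dict_sorter
-- ===== SOURCE A (Python) =====
-- def dict_sorter(my_dict):
--     """
--         Function to sort the dictionaries for url and ips and that in the
--         event of a tie for 3rd place will extend the length of the array to
--         include all elements that match the value of 3rd place
--     """
--     my_keys = sorted(my_dict, key=my_dict.get, reverse=True)
--     sorted_dict = {key: my_dict[key] for key in my_keys}
--     i = 3
--     for element in range(2, len(my_keys) - 1):
--         if sorted_dict[my_keys[element]] == sorted_dict[my_keys[element+1]]:
--             i = i + 1
--         else:
--             break
--     top_three_dict = my_keys[:i]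
--     return {key: my_dict[key] for key in top_three_dict}
-- ===== SOURCE B (Python) =====
-- def dict_sorter(my_dict):
--     """O(n) re-implementation: one-pass selection of the three largest values
--     (with multiplicity), then group the keys by those values in stable order."""
--     items = list(my_dict.items())
--     if not items:
--         return {}
--     # one-pass selection of the three largest values a >= b >= c (with multiplicity)
--     a = items[0][1]
--     b = c = None
--     for _, v in items[1:]:
--         if v > a:
--             a, b, c = v, a, b
--         elif b is None:
--             b, c = v, None
--         elif v > b:
--             b, c = v, b
--         elif c is None or v > c:
--             c = v
--     cutoff = a if b is None else (b if c is None else c)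
--     out = {}
--     if cutoff < a:
--         for k, v in items:
--             if v == a:
--                 out[k] = v
--         if b is not None and cutoff < b and b < a:
--             for k, v in items:
--                 if v == b:
--                     out[k] = v
--     for k, v in items:
--         if v == cutoff:
--             out[k] = v
--     return out
-- ===== Notes on version B (the rewrite author's own statement) =====
-- stated objective: faster
-- what changed: B replaces A's full descending sort of the keys (plus the run-scan for 3rd-place ties) by a single-pass selection of the three largest values and at most three stable filter passes that collect the keys group by group.
import Mathlib
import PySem

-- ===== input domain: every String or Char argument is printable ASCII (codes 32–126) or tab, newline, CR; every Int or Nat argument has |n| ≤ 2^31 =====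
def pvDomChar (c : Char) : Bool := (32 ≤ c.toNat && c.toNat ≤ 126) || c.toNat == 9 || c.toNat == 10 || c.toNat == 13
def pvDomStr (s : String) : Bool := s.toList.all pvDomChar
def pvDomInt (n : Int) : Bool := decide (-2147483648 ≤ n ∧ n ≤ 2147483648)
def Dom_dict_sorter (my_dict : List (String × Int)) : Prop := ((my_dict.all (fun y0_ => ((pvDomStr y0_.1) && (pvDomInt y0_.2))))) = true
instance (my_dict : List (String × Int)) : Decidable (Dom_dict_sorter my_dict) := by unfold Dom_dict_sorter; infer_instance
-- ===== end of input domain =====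

-- B replaces A's full sort of the keys by a one-pass selection of the three largest
-- values and grouped filter passes; the returned association lists are proved equal.

-- ===== PORT A =====
-- helper: the `for element in range(2, len(my_keys)-1)` loop with its break;
-- the always-present dict lookups `sorted_dict[my_keys[...]]` are ported as getD

def dictSorterLoop (sd : PySem.Dict String Int) (ks : List String) : List Int → Int → Int
  | [], i => i
  | e :: rest, i =>
    if sd.getD (PySem.List.pyGetD ks e "") 0 == sd.getD (PySem.List.pyGetD ks (e + 1) "") 0 then
      dictSorterLoop sd ks rest (i + 1)
    else i

def dict_sorter (my_dict : List (String × Int)) : List (String × Int) :=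
  let d : PySem.Dict String Int := my_dict.foldl (fun d p => d.insert p.1 p.2) PySem.Dict.empty
  let my_keys := PySem.List.sorted d.keys (fun k => d.getD k 0) true
  let sorted_dict : PySem.Dict String Int :=
    my_keys.foldl (fun sd k => sd.insert k (d.getD k 0)) PySem.Dict.empty
  let i := dictSorterLoop sorted_dict my_keys (PySem.List.pyRange 2 ((my_keys.length : Int) - 1)) 3
  let top_three := PySem.List.slice my_keys none (some i)
  (top_three.foldl (fun (t : PySem.Dict String Int) k => t.insert k (d.getD k 0)) PySem.Dict.empty).items

-- ===== PORT B =====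
-- helper: one step of Source B's running top-3 value selection (a >= b >= c, with multiplicity)
def dictSorterSelect (st : Int × Option Int × Option Int) (v : Int) : Int × Option Int × Option Int :=
  if st.1 < v then (v, some st.1, st.2.1)
  else
    match st.2.1 with
    | none => (st.1, some v, none)
    | some b =>
      if b < v then (st.1, some v, some b)
      else
        match st.2.2 with
        | none => (st.1, some b, some v)
        | some c => if c < v then (st.1, some b, some v) else (st.1, some b, some c)

def dict_sorter_alt (my_dict : List (String × Int)) : List (String × Int) :=
  let d : PySem.Dict String Int := my_dict.foldl (fun d p => d.insert p.1 p.2) PySem.Dict.empty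
  match d.items with
  | [] => []
  | p0 :: rest =>
    let sel := rest.foldl (fun st q => dictSorterSelect st q.2) (p0.2, none, none)
    let a := sel.1
    let cutoff : Int :=
      match sel.2.1 with
      | none => a
      | some b => match sel.2.2 with | none => b | some c => c
    let items := p0 :: rest
    let out1 : PySem.Dict String Int :=
      if cutoff < a then
        let o := items.foldl
          (fun (o : PySem.Dict String Int) p => if p.2 == a then o.insert p.1 p.2 else o)
          PySem.Dict.empty
        match sel.2.1 with
        | some b =>
          if cutoff < b && b < a then
            items.foldl (fun (o : PySem.Dict String Int) p => if p.2 == b then o.insert p.1 p.2 else o) o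
          else o
        | none => o
      else PySem.Dict.empty
    (items.foldl (fun (o : PySem.Dict String Int) p => if p.2 == cutoff then o.insert p.1 p.2 else o) out1).items

-- ===== PRECONDITION & SPEC =====
def Spec_dict_sorter (my_dict : List (String × Int)) (out : List (String × Int)) : Prop := out = dict_sorter_alt my_dict
instance (my_dict : List (String × Int)) (out : List (String × Int)) : Decidable (Spec_dict_sorter my_dict out) := by unfold Spec_dict_sorter; infer_instance

-- ===== CLAIM (what is proved, stated in full; the proofs are below) =====
def Claim_equal_dict_sorter : Prop := ∀ (my_dict : List (String × Int)), Dom_dict_sorter my_dict → Spec_dict_sorter my_dict (dict_sorter my_dict)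

-- ===== LEMMAS AND PROOFS =====

theorem pv_insertBy_map {α β : Type} (f : α → β) (bef : β → β → Bool) (x : α) :
    ∀ (ys : List α),
    PySem.List.insertBy bef (f x) (ys.map f)
      = (PySem.List.insertBy (fun a b => bef (f a) (f b)) x ys).map f := by
  intro ys
  induction ys with
  | nil => simp [PySem.List.insertBy]
  | cons y t ih =>
    simp only [List.map_cons, PySem.List.insertBy]
    by_cases h : bef (f x) (f y) = true
    · simp [h]
    · simp [h, ih]

theorem pv_foldl_insertBy_map {α β : Type} (f : α → β) (bef : β → β → Bool) :
    ∀ (xs : List α) (acc : List α),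
    (xs.map f).foldl (fun acc x => PySem.List.insertBy bef x acc) (acc.map f)
      = (xs.foldl (fun acc x => PySem.List.insertBy (fun a b => bef (f a) (f b)) x acc) acc).map f := by
  intro xs
  induction xs with
  | nil => simp
  | cons x t ih =>
    intro acc
    simp only [List.map_cons, List.foldl_cons]
    rw [pv_insertBy_map f bef x acc, ih]

theorem pv_sorted_rev_map {α β : Type} (f : α → β) (key : β → Int) (xs : List α) :
    PySem.List.sorted (xs.map f) key true
      = (PySem.List.sorted xs (fun x => key (f x)) true).map f := by
  rw [PySem.List.sorted_rev_eq_foldl_insertBy, PySem.List.sorted_rev_eq_foldl_insertBy]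
  have := pv_foldl_insertBy_map f (fun a b => decide (key b < key a)) xs []
  simpa using this

theorem pv_insertBy_congr {α : Type} (key key' : α → Int) (x : α) :
    ∀ (ys : List α), key x = key' x → (∀ y ∈ ys, key y = key' y) →
    PySem.List.insertBy (fun a b => decide (key b < key a)) x ys
      = PySem.List.insertBy (fun a b => decide (key' b < key' a)) x ys := by
  intro ys
  induction ys with
  | nil => intros; rfl
  | cons y t ih =>
    intro hx hys
    have hy : key y = key' y := hys y (by simp)
    simp only [PySem.List.insertBy, hx, hy]
    by_cases h : key' y < key' x
    · simp [h]
    · simp [h, ih hx (fun z hz => hys z (by simp [hz]))]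

theorem pv_sorted_rev_congr {α : Type} (key key' : α → Int) (xs : List α)
    (h : ∀ x ∈ xs, key x = key' x) :
    PySem.List.sorted xs key true = PySem.List.sorted xs key' true := by
  rw [PySem.List.sorted_rev_eq_foldl_insertBy, PySem.List.sorted_rev_eq_foldl_insertBy]
  suffices H : ∀ (l : List α) (acc : List α), (∀ x ∈ l, key x = key' x) → (∀ y ∈ acc, key y = key' y) →
      l.foldl (fun acc x => PySem.List.insertBy (fun a b => decide (key b < key a)) x acc) acc
        = l.foldl (fun acc x => PySem.List.insertBy (fun a b => decide (key' b < key' a)) x acc) acc by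
    exact H xs [] h (by simp)
  intro l
  induction l with
  | nil => intros; rfl
  | cons x t ih =>
    intro acc hl hacc
    have hx : key x = key' x := hl x (by simp)
    simp only [List.foldl_cons]
    rw [pv_insertBy_congr key key' x acc hx hacc]
    exact ih _ (fun z hz => hl z (by simp [hz]))
      (fun y hy => by
        rcases (PySem.List.mem_insertBy _ x y acc).1 hy with h' | h'
        · exact h' ▸ hx
        · exact hacc y h')

theorem pv_insertBy_rev_pairwise {α : Type} (key : α → Int) (x : α) :
    ∀ (ys : List α), ys.Pairwise (fun a b => key b ≤ key a) →
    (PySem.List.insertBy (fun a b => decide (key b < key a)) x ys).Pairwise (fun a b => key b ≤ key a) := by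
  intro ys
  induction ys with
  | nil => intro _; simp [PySem.List.insertBy]
  | cons y t ih =>
    intro h
    rw [List.pairwise_cons] at h
    obtain ⟨hy, ht⟩ := h
    simp only [PySem.List.insertBy]
    by_cases hc : key y < key x
    · simp only [hc, decide_true, if_true]
      refine List.Pairwise.cons ?_ (List.Pairwise.cons hy ht)
      intro z hz
      rcases hz with _ | hz
      · exact le_of_lt hc
      · exact le_trans (hy z (by assumption)) (le_of_lt hc)
    · simp only [hc, decide_false]
      refine List.Pairwise.cons ?_ (ih ht)
      intro z hz
      rcases (PySem.List.mem_insertBy _ x z t).1 hz with h' | h'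
      · subst h'; omega
      · exact hy z h'

theorem pv_filter_insertBy_ne {α : Type} (key : α → Int) (x : α) (v : Int) (hx : ¬ key x = v) :
    ∀ (ys : List α),
    (PySem.List.insertBy (fun a b => decide (key b < key a)) x ys).filter (fun y => key y == v)
      = ys.filter (fun y => key y == v) := by
  intro ys
  induction ys with
  | nil => simp [PySem.List.insertBy, List.filter, hx]
  | cons y t ih =>
    simp only [PySem.List.insertBy]
    by_cases hc : key y < key x
    · simp [hc, List.filter, hx]
    · simp only [hc, decide_false]
      by_cases hy : key y = v <;> simp [hy, ih]

theorem pv_filter_insertBy_eq {α : Type} (key : α → Int) (x : α) (v : Int) (hx : key x = v) :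
    ∀ (ys : List α), ys.Pairwise (fun a b => key b ≤ key a) →
    (PySem.List.insertBy (fun a b => decide (key b < key a)) x ys).filter (fun y => key y == v)
      = ys.filter (fun y => key y == v) ++ [x] := by
  intro ys
  induction ys with
  | nil => simp [PySem.List.insertBy, List.filter, hx]
  | cons y t ih =>
    intro h
    rw [List.pairwise_cons] at h
    obtain ⟨hy, ht⟩ := h
    simp only [PySem.List.insertBy]
    by_cases hc : key y < key x
    · -- x goes in front: everything in y::t has key ≤ key y < key x = v, so filter (y::t) = []
      simp only [hc, decide_true, if_true]
      have hnil : (y :: t).filter (fun z => key z == v) = [] := by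
        apply List.filter_eq_nil_iff.2
        intro z hz
        have : key z < v := by
          rcases hz with _ | hz
          · omega
          · have := hy z (by assumption); omega
        simp; omega
      rw [List.filter_cons_of_pos (by simp [hx]), hnil]
      rfl
    · simp only [hc, decide_false]
      by_cases hyv : key y = v <;> simp [hyv, ih ht]

-- stability of Python's reverse sort: each equal-key group keeps the original order
theorem pv_sorted_rev_filter {α : Type} (key : α → Int) (xs : List α) (v : Int) :
    (PySem.List.sorted xs key true).filter (fun x => key x == v)
      = xs.filter (fun x => key x == v) := by
  rw [PySem.List.sorted_rev_eq_foldl_insertBy]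
  suffices H : ∀ (l acc : List α), acc.Pairwise (fun a b => key b ≤ key a) →
      (l.foldl (fun acc x => PySem.List.insertBy (fun a b => decide (key b < key a)) x acc) acc).filter
          (fun x => key x == v)
        = acc.filter (fun x => key x == v) ++ l.filter (fun x => key x == v) by
    simpa using H xs [] (by simp)
  intro l
  induction l with
  | nil => intro acc _; simp
  | cons x t ih =>
    intro acc hacc
    simp only [List.foldl_cons]
    rw [ih _ (pv_insertBy_rev_pairwise key x acc hacc)]
    by_cases hx : key x = v
    · rw [pv_filter_insertBy_eq key x v hx acc hacc,
        List.filter_cons_of_pos (by simp [hx])]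
      simp
    · rw [pv_filter_insertBy_ne key x v hx acc,
        List.filter_cons_of_neg (by simp [hx])]

-- in a descending list whose every element is ≤ v, the v-group is an initial segment
theorem pv_filter_eq_takeWhile {α : Type} (key : α → Int) (v : Int) :
    ∀ (l : List α), l.Pairwise (fun a b => key b ≤ key a) → (∀ x ∈ l, key x ≤ v) →
    l.filter (fun x => key x == v) = l.takeWhile (fun x => key x == v) := by
  intro l
  induction l with
  | nil => simp
  | cons x t ih =>
    intro h hle
    rw [List.pairwise_cons] at h
    obtain ⟨hx, ht⟩ := h
    by_cases hxv : key x = v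
    · rw [List.filter_cons_of_pos (by simp [hxv]), List.takeWhile_cons_of_pos (by simp [hxv]),
        ih ht (fun z hz => hle z (by simp [hz]))]
    · rw [List.filter_cons_of_neg (by simp [hxv]), List.takeWhile_cons_of_neg (by simp [hxv])]
      apply List.filter_eq_nil_iff.2
      intro z hz
      have h1 := hx z hz
      have h2 := hle x (by simp)
      simp
      omega

theorem pv_getD_of_mem_items {κ ν : Type} [BEq κ] [LawfulBEq κ] (d : PySem.Dict κ ν)
    (hnd : d.keys.Nodup) (p : κ × ν) (hp : p ∈ d.items) (dflt : ν) :
    d.getD p.1 dflt = p.2 := by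
  rw [PySem.Dict.items_eq_map_keys d hnd dflt] at hp
  obtain ⟨k, hk, rfl⟩ := List.mem_map.1 hp
  rfl

theorem pv_pair_eq_of_fst_eq {α β : Type} (l : List (α × β)) (hnd : (l.map Prod.fst).Nodup)
    (p q : α × β) (hp : p ∈ l) (hq : q ∈ l) (h : p.1 = q.1) : p = q := by
  exact List.inj_on_of_nodup_map hnd hp hq h

theorem pv_groupFold_items (items : List (String × Int)) (hnd : (items.map Prod.fst).Nodup)
    (v : Int) (o : PySem.Dict String Int)
    (ho : ∀ p ∈ items, p.2 = v → o.contains p.1 = false) :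
    (items.foldl (fun (o : PySem.Dict String Int) p => if p.2 == v then o.insert p.1 p.2 else o) o).items
      = o.items ++ items.filter (fun p => p.2 == v) := by
  rw [← List.foldl_filter]
  have h := PySem.Dict.items_foldl_insert_fresh (items.filter (fun p => p.2 == v))
      Prod.fst Prod.snd o
      (fun p hp => ho p (List.mem_of_mem_filter hp)
        (by have := List.of_mem_filter hp; simpa using this))
      ((hnd.sublist ((List.filter_sublist).map Prod.fst)))
  simpa using h

theorem pv_select_insertBy (v : Int) :
    ∀ (l : List Int), l ≠ [] →
    dictSorterSelect (l.headD 0, l[1]?, l[2]?) v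
      = ((PySem.List.insertBy (fun a b => decide (b < a)) v l).headD 0,
         (PySem.List.insertBy (fun a b => decide (b < a)) v l)[1]?,
         (PySem.List.insertBy (fun a b => decide (b < a)) v l)[2]?) := by
  intro l hl
  match l with
  | [x0] =>
    by_cases h0 : x0 < v <;>
      simp [dictSorterSelect, PySem.List.insertBy, h0]
  | [x0, x1] =>
    by_cases h0 : x0 < v <;> by_cases h1 : x1 < v <;>
      simp [dictSorterSelect, PySem.List.insertBy, h0, h1]
  | x0 :: x1 :: x2 :: t =>
    by_cases h0 : x0 < v <;> by_cases h1 : x1 < v <;> by_cases h2 : x2 < v <;>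
      simp [dictSorterSelect, PySem.List.insertBy, h0, h1, h2]

theorem pv_sel_fold (v0 : Int) (vs : List Int) :
    vs.foldl (fun st v => dictSorterSelect st v) ((v0 : Int), (none : Option Int), (none : Option Int))
      = ((PySem.List.sorted (v0 :: vs) (fun x => x) true).headD 0,
         (PySem.List.sorted (v0 :: vs) (fun x => x) true)[1]?,
         (PySem.List.sorted (v0 :: vs) (fun x => x) true)[2]?) := by
  induction vs using List.reverseRecOn with
  | nil => simp [PySem.List.sorted, PySem.List.insertBy]
  | append_singleton vs v ih =>
    rw [List.foldl_append, List.foldl_cons, List.foldl_nil, ih]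
    have hne : PySem.List.sorted (v0 :: vs) (fun x => x) true ≠ [] := by
      rw [Ne, PySem.List.sorted_eq_nil_iff]; simp
    rw [pv_select_insertBy v _ hne]
    have hrw : PySem.List.sorted (v0 :: (vs ++ [v])) (fun x => x) true
        = PySem.List.insertBy (fun a b => decide (b < a)) v
            (PySem.List.sorted (v0 :: vs) (fun x => x) true) := by
      rw [PySem.List.sorted_rev_eq_foldl_insertBy, PySem.List.sorted_rev_eq_foldl_insertBy,
        ← List.cons_append, List.foldl_append, List.foldl_cons, List.foldl_nil]
    rw [hrw]

theorem pv_pyRange_nil (a b : Int) (h : b ≤ a) : PySem.List.pyRange a b = [] := by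
  rw [PySem.List.pyRange_one]
  have : (b - a).toNat = 0 := by omega
  simp [this]

theorem pv_loop_spec (sd : PySem.Dict String Int) (ks : List String) (s : List (String × Int))
    (hval : ∀ (j : Nat) (h : j < s.length), sd.getD (PySem.List.pyGetD ks (j : Int) "") 0 = (s[j]).2) :
    ∀ (m j : Nat), s.length - j ≤ m → (hj : j < s.length) →
    dictSorterLoop sd ks (PySem.List.pyRange (j : Int) ((s.length : Int) - 1)) ((j : Int) + 1)
      = (j : Int) + 1 + ((s.drop (j + 1)).takeWhile (fun p => p.2 == (s[j]'hj).2)).length := by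
  intro m
  induction m with
  | zero => intro j h hj; omega
  | succ m ih =>
    intro j h hj
    by_cases hend : j + 1 < s.length
    · rw [PySem.List.pyRange_one_cons (by omega)]
      have hvj := hval j hj
      have hvj1 := hval (j + 1) hend
      have hcast : (j : Int) + 1 = ((j + 1 : Nat) : Int) := by push_cast; ring
      rw [List.drop_eq_getElem_cons hend]
      by_cases heq : (s[j]'hj).2 = (s[j + 1]'hend).2
      · have hcond : (sd.getD (PySem.List.pyGetD ks (j : Int) "") 0
            == sd.getD (PySem.List.pyGetD ks ((j : Int) + 1) "") 0) = true := by
          rw [hvj, hcast, hvj1]; simp [heq]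
        rw [dictSorterLoop, if_pos hcond]
        have := ih (j + 1) (by omega) hend
        rw [hcast]
        push_cast at this ⊢
        rw [this]
        rw [List.takeWhile_cons_of_pos (by simp [heq])]
        have hpred : (fun p : String × Int => p.2 == (s[j]'hj).2)
            = (fun p : String × Int => p.2 == (s[j + 1]'hend).2) := by
          funext p; rw [heq]
        rw [hpred]
        simp
        omega
      · have hcond : (sd.getD (PySem.List.pyGetD ks (j : Int) "") 0
            == sd.getD (PySem.List.pyGetD ks ((j : Int) + 1) "") 0) = false := by
          rw [hvj, hcast, hvj1]; simp; omega
        rw [dictSorterLoop, if_neg (by rw [hcond]; simp)]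
        rw [List.takeWhile_cons_of_neg (by simp; omega)]
        simp
    · have hnil : PySem.List.pyRange (j : Int) ((s.length : Int) - 1) = [] :=
        pv_pyRange_nil _ _ (by omega)
      rw [hnil, dictSorterLoop]
      have : s.drop (j + 1) = [] := List.drop_of_length_le (by omega)
      rw [this]
      simp

theorem pv_contains_false (items : List (String × Int)) (hnd : (items.map Prod.fst).Nodup)
    (o : PySem.Dict String Int) (w : Int)
    (hsub : ∀ q ∈ o.items, q ∈ items ∧ q.2 ≠ w) :
    ∀ p ∈ items, p.2 = w → o.contains p.1 = false := by
  intro p hp hpw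
  by_contra hcon
  have hc : o.contains p.1 = true := by
    cases h : o.contains p.1
    · exact absurd h hcon
    · rfl
  simp only [PySem.Dict.contains, List.any_eq_true] at hc
  obtain ⟨q, hq, hq1⟩ := hc
  have hqp : q = p := pv_pair_eq_of_fst_eq items hnd q p (hsub q hq).1 hp (by simpa using hq1)
  exact (hsub q hq).2 (by rw [hqp, hpw])

theorem dict_sorter_main (L : List (String × Int)) :
    dict_sorter L = dict_sorter_alt L := by
  simp only [dict_sorter, dict_sorter_alt]
  set D : PySem.Dict String Int := L.foldl (fun d p => d.insert p.1 p.2) PySem.Dict.empty with hD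
  have hnd : D.keys.Nodup :=
    PySem.Dict.nodup_keys_foldl_insert_key L Prod.fst (fun _ p => p.2) PySem.Dict.empty List.nodup_nil
  obtain ⟨s, hs⟩ : ∃ s, s = PySem.List.sorted D.items (fun p => p.2) true := ⟨_, rfl⟩
  have hpermi : s.Perm D.items := hs ▸ PySem.List.sorted_perm _ _ _
  have hmem : ∀ p ∈ s, p ∈ D.items := fun p hp => hpermi.mem_iff.1 hp
  have hnds : (s.map Prod.fst).Nodup := ((hpermi.map Prod.fst).nodup_iff).2 hnd
  have hsnil : s = [] ↔ D.items = [] := by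
    rw [hs, PySem.List.sorted_eq_nil_iff]
  have hkeys : PySem.List.sorted D.keys (fun k => D.getD k 0) true = s.map Prod.fst := by
    have h1 : D.keys = D.items.map Prod.fst := rfl
    rw [h1, pv_sorted_rev_map Prod.fst (fun k => D.getD k 0) D.items,
      pv_sorted_rev_congr (fun x => D.getD x.1 0) (fun p => p.2) D.items
        (fun p hp => pv_getD_of_mem_items D hnd p hp 0), ← hs]
  rw [hkeys]
  -- the intermediate dict sorted_dict
  have hsd_items : (List.foldl (fun t k => t.insert k (D.getD k 0)) PySem.Dict.empty
      (s.map Prod.fst)).items = (s.map Prod.fst).map (fun k => (k, D.getD k 0)) := by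
    have h := PySem.Dict.items_foldl_insert_fresh (s.map Prod.fst) (fun k => k)
      (fun k => D.getD k 0) PySem.Dict.empty (fun a _ => rfl) (by simpa using hnds)
    simpa using h
  have hsdnd : (List.foldl (fun t k => t.insert k (D.getD k 0)) PySem.Dict.empty
      (s.map Prod.fst)).keys.Nodup := by
    have hk : (List.foldl (fun t k => t.insert k (D.getD k 0)) PySem.Dict.empty
        (s.map Prod.fst)).keys = s.map Prod.fst := by
      show (List.foldl (fun t k => t.insert k (D.getD k 0)) PySem.Dict.empty
        (s.map Prod.fst)).items.map Prod.fst = s.map Prod.fst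
      rw [hsd_items, List.map_map]
      simp
    rw [hk]; exact hnds
  have hval : ∀ (j : Nat) (h : j < s.length),
      (List.foldl (fun t k => t.insert k (D.getD k 0)) PySem.Dict.empty
        (s.map Prod.fst)).getD (PySem.List.pyGetD (s.map Prod.fst) (j : Int) "") 0 = (s[j]).2 := by
    intro j hj
    have hget : PySem.List.pyGetD (s.map Prod.fst) (j : Int) "" = (s[j]).1 := by
      rw [PySem.List.pyGetD_eq_getElem _ _ (by omega) (by simpa using (by omega : (j:Int) < (s.length:Int)))]
      simp
    rw [hget]
    have hpmem : ((s[j]).1, D.getD (s[j]).1 0) ∈ (List.foldl (fun t k => t.insert k (D.getD k 0))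
        PySem.Dict.empty (s.map Prod.fst)).items := by
      rw [hsd_items]
      exact List.mem_map.2 ⟨(s[j]).1, List.mem_map.2 ⟨s[j], List.getElem_mem hj, rfl⟩, rfl⟩
    have h2 := pv_getD_of_mem_items _ hsdnd _ hpmem 0
    simp only at h2
    rw [h2]
    exact pv_getD_of_mem_items D hnd (s[j]) (hmem _ (List.getElem_mem hj)) 0
  -- the loop result
  obtain ⟨i, hi⟩ : ∃ i, i = dictSorterLoop
      (List.foldl (fun t k => t.insert k (D.getD k 0)) PySem.Dict.empty (s.map Prod.fst))
      (s.map Prod.fst) (PySem.List.pyRange 2 (((s.map Prod.fst).length : Int) - 1)) 3 := ⟨_, rfl⟩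
  rw [← hi]
  have hi_small : s.length < 3 → i = 3 := by
    intro h
    rw [hi, show (((s.map Prod.fst).length : Int) - 1) = (s.length : Int) - 1 by simp,
      pv_pyRange_nil 2 _ (by omega)]
    rfl
  have hi_big : ∀ (h2 : 2 < s.length),
      i = 3 + (((s.drop 3).takeWhile (fun p => p.2 == (s[2]'h2).2)).length : Int) := by
    intro h2
    have hloop := pv_loop_spec _ (s.map Prod.fst) s hval s.length 2 (by omega) h2
    norm_num at hloop
    rw [hi, show (((s.map Prod.fst).length : Int) - 1) = ((s.length : Int) - 1) by simp, hloop]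
  have hipos : 0 ≤ i := by
    by_cases h : 2 < s.length
    · rw [hi_big h]; omega
    · rw [hi_small (by omega)]; omega
  -- A's output is the first i items in sorted order
  have hA : (List.foldl (fun t k => t.insert k (D.getD k 0)) PySem.Dict.empty
      (PySem.List.slice (s.map Prod.fst) none (some i))).items = s.take i.toNat := by
    rw [PySem.List.slice_to _ hipos, ← List.map_take]
    have hsub : ((s.take i.toNat).map Prod.fst).Sublist (s.map Prod.fst) :=
      (List.take_sublist _ _).map Prod.fst
    have h := PySem.Dict.items_foldl_insert_fresh ((s.take i.toNat).map Prod.fst) (fun k => k)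
      (fun k => D.getD k 0) PySem.Dict.empty (fun a _ => rfl) (by simpa using hnds.sublist hsub)
    simp only [List.map_map] at h
    rw [h]
    have : ∀ p ∈ s.take i.toNat, ((fun k => (k, D.getD k 0)) ∘ Prod.fst) p = p := by
      intro p hp
      have := pv_getD_of_mem_items D hnd p (hmem p (List.mem_of_mem_take hp)) 0
      simp only [Function.comp_apply, this]
    rw [List.map_congr_left this]
    simp [PySem.Dict.empty]
  rw [hA]
  have hFilt : ∀ v : Int, D.items.filter (fun p => p.2 == v) = s.filter (fun p => p.2 == v) := by
    intro v
    rw [hs]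
    exact (pv_sorted_rev_filter (fun p => p.2) D.items v).symm
  have hpw : s.Pairwise (fun a b => b.2 ≤ a.2) := by
    rw [hs]
    exact PySem.List.sorted_pairwise_rev D.items (fun p => p.2)
  cases h : D.items with
  | nil =>
    have hse : s = [] := hsnil.2 h
    simp [hse]
  | cons p0 rest =>
    dsimp only
    have hlen : s.length = rest.length + 1 := by
      rw [hpermi.length_eq, h, List.length_cons]
    have hmapsnd : PySem.List.sorted (D.items.map (fun p => p.2)) (fun x => x) true
        = s.map (fun p => p.2) := by
      have h2 := pv_sorted_rev_map (fun p : String × Int => p.2) (fun x : Int => x) D.items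
      simp only at h2
      rw [h2, ← hs]
    have hsel : rest.foldl (fun st q => dictSorterSelect st q.2) (p0.2, none, none)
        = ((s.map (fun p => p.2)).headD 0, (s.map (fun p => p.2))[1]?,
           (s.map (fun p => p.2))[2]?) := by
      have h1 : rest.foldl (fun st q => dictSorterSelect st q.2) (p0.2, none, none)
          = (rest.map (fun q => q.2)).foldl (fun st v => dictSorterSelect st v)
              (p0.2, none, none) := by
        rw [List.foldl_map]
      rw [h1, pv_sel_fold p0.2 (rest.map (fun q => q.2)),
        show p0.2 :: rest.map (fun q => q.2) = D.items.map (fun p => p.2) by rw [h]; rfl,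
        hmapsnd]
    rw [hsel]
    rcases s with _ | ⟨q0, s1⟩
    · simp at hlen
    rcases s1 with _ | ⟨q1, s2⟩
    · -- one entry
      have hi3 : i = 3 := hi_small (by simp)
      have hO : (List.foldl (fun o p => if p.2 == q0.2 then o.insert p.1 p.2 else o)
          PySem.Dict.empty (p0 :: rest)).items = [q0] := by
        rw [← h, pv_groupFold_items D.items hnd q0.2 PySem.Dict.empty (fun p _ _ => rfl), hFilt]
        simp [PySem.Dict.empty]
      simp only [List.map_cons, List.map_nil, List.headD_cons, hi3]
      simp only [show ([q0.2] : List Int)[1]? = none from rfl]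
      rw [if_neg (lt_irrefl q0.2), hO]
      rfl
    rcases s2 with _ | ⟨q2, t⟩
    · -- two entries
      have hi3 : i = 3 := hi_small (by simp)
      have h01 : q1.2 ≤ q0.2 := (List.pairwise_cons.1 hpw).1 q1 (by simp)
      simp only [List.map_cons, List.map_nil, List.headD_cons,
        show (([q0.2, q1.2] : List Int))[1]? = some q1.2 from rfl,
        show (([q0.2, q1.2] : List Int))[2]? = none from rfl, hi3]
      by_cases hv : q1.2 = q0.2
      · rw [if_neg (by rw [hv]; exact lt_irrefl q0.2)]
        have hO : (List.foldl (fun o p => if p.2 == q1.2 then o.insert p.1 p.2 else o)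
            PySem.Dict.empty (p0 :: rest)).items = [q0, q1] := by
          rw [← h, pv_groupFold_items D.items hnd q1.2 PySem.Dict.empty (fun p _ _ => rfl), hFilt]
          simp [PySem.Dict.empty, hv]
        rw [hO]
        rfl
      · have hlt : q1.2 < q0.2 := lt_of_le_of_ne h01 hv
        rw [if_pos hlt, if_neg (by simp)]
        have hO1 : (List.foldl (fun o p => if p.2 == q0.2 then o.insert p.1 p.2 else o)
            PySem.Dict.empty (p0 :: rest)).items = [q0] := by
          rw [← h, pv_groupFold_items D.items hnd q0.2 PySem.Dict.empty (fun p _ _ => rfl), hFilt]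
          simp [PySem.Dict.empty, hv]
        have hO1' : (List.foldl (fun o p => if p.2 == q0.2 then o.insert p.1 p.2 else o)
            PySem.Dict.empty D.items).items = [q0] := by rw [h]; exact hO1
        have hOut : (List.foldl (fun o p => if p.2 == q1.2 then o.insert p.1 p.2 else o)
            (List.foldl (fun o p => if p.2 == q0.2 then o.insert p.1 p.2 else o)
              PySem.Dict.empty (p0 :: rest)) (p0 :: rest)).items = [q0, q1] := by
          rw [show (p0 :: rest) = D.items from h.symm,
            pv_groupFold_items D.items hnd q1.2 _
              (pv_contains_false D.items hnd _ q1.2 (fun q hq => by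
                rw [hO1'] at hq
                simp only [List.mem_singleton] at hq
                rw [hq]
                exact ⟨hmem q0 (by simp), ne_of_gt hlt⟩)),
            hFilt, hO1']
          rw [List.filter_cons_of_neg (by simp; omega), List.filter_cons_of_pos (by simp),
            List.filter_nil]
          rfl
        exact Eq.trans (by rfl) hOut.symm
    · -- three or more entries
      have h2lt : 2 < (q0 :: q1 :: q2 :: t).length := by simp
      have hp1 := List.pairwise_cons.1 hpw
      have h01 : q1.2 ≤ q0.2 := hp1.1 q1 (by simp)
      have hp2 := List.pairwise_cons.1 hp1.2
      have h12 : q2.2 ≤ q1.2 := hp2.1 q2 (by simp)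
      have hpt : ∀ x ∈ t, x.2 ≤ q2.2 := (List.pairwise_cons.1 hp2.2).1
      have hptw : t.Pairwise (fun a b => b.2 ≤ a.2) := (List.pairwise_cons.1 hp2.2).2
      have htnil : ∀ v : Int, q2.2 < v → t.filter (fun p => p.2 == v) = [] := by
        intro v hv
        refine List.filter_eq_nil_iff.2 (fun x hx => ?_)
        have := hpt x hx
        simp only [beq_iff_eq]
        omega
      have httw : t.filter (fun p => p.2 == q2.2) = t.takeWhile (fun p => p.2 == q2.2) :=
        pv_filter_eq_takeWhile (fun p => p.2) q2.2 t hptw hpt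
      have hi' : i = 3 + ((t.takeWhile (fun p => p.2 == q2.2)).length : Int) := by
        have hb := hi_big h2lt
        simpa using hb
      have htake : List.take i.toNat (q0 :: q1 :: q2 :: t)
          = q0 :: q1 :: q2 :: t.takeWhile (fun p => p.2 == q2.2) := by
        have hiN : i.toNat = ((t.takeWhile (fun p => p.2 == q2.2)).length + 1 + 1) + 1 := by omega
        rw [hiN, List.take_succ_cons, List.take_succ_cons, List.take_succ_cons]
        rw [(List.prefix_iff_eq_take.1 (List.takeWhile_prefix _)).symm]
      rw [htake]
      simp only [List.map_cons, List.headD_cons,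
        show ((q0.2 :: q1.2 :: q2.2 :: t.map (fun p => p.2)) : List Int)[1]? = some q1.2 from rfl,
        show ((q0.2 :: q1.2 :: q2.2 :: t.map (fun p => p.2)) : List Int)[2]? = some q2.2 from rfl]
      by_cases hca : q2.2 < q0.2
      · rw [if_pos hca]
        have hO1 : (List.foldl (fun o p => if p.2 == q0.2 then o.insert p.1 p.2 else o)
            PySem.Dict.empty D.items).items
            = List.filter (fun p => p.2 == q0.2) (q0 :: q1 :: q2 :: t) := by
          rw [pv_groupFold_items D.items hnd q0.2 PySem.Dict.empty (fun p _ _ => rfl), hFilt]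
          rfl
        by_cases hba : q1.2 = q0.2
        · rw [if_neg (by simp [hba])]
          have hO1v : (List.foldl (fun o p => if p.2 == q0.2 then o.insert p.1 p.2 else o)
              PySem.Dict.empty D.items).items = [q0, q1] := by
            rw [hO1, List.filter_cons_of_pos (by simp), List.filter_cons_of_pos (by simp [hba]),
              List.filter_cons_of_neg (by simp; omega), htnil q0.2 (by omega)]
          have hOut : (List.foldl (fun o p => if p.2 == q2.2 then o.insert p.1 p.2 else o)
              (List.foldl (fun o p => if p.2 == q0.2 then o.insert p.1 p.2 else o)
                PySem.Dict.empty (p0 :: rest)) (p0 :: rest)).items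
              = q0 :: q1 :: q2 :: t.takeWhile (fun p => p.2 == q2.2) := by
            rw [show (p0 :: rest) = D.items from h.symm,
              pv_groupFold_items D.items hnd q2.2 _
                (pv_contains_false D.items hnd _ q2.2 (fun q hq => by
                  rw [hO1v] at hq
                  simp only [List.mem_cons, List.not_mem_nil, or_false] at hq
                  rcases hq with hq | hq
                  · rw [hq]; exact ⟨hmem q0 (by simp), by omega⟩
                  · rw [hq]; exact ⟨hmem q1 (by simp), by omega⟩)),
              hFilt, hO1v, List.filter_cons_of_neg (by simp; omega),
              List.filter_cons_of_neg (by simp; omega), List.filter_cons_of_pos (by simp),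
              httw]
            rfl
          exact Eq.trans (by rfl) hOut.symm
        · have hb0 : q1.2 < q0.2 := lt_of_le_of_ne h01 hba
          have hO1v : (List.foldl (fun o p => if p.2 == q0.2 then o.insert p.1 p.2 else o)
              PySem.Dict.empty D.items).items = [q0] := by
            rw [hO1, List.filter_cons_of_pos (by simp), List.filter_cons_of_neg (by simp; omega),
              List.filter_cons_of_neg (by simp; omega), htnil q0.2 (by omega)]
          by_cases hcb : q2.2 < q1.2
          · rw [if_pos (by simp [hcb, hb0])]
            have hO2v : (List.foldl (fun o p => if p.2 == q1.2 then o.insert p.1 p.2 else o)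
                (List.foldl (fun o p => if p.2 == q0.2 then o.insert p.1 p.2 else o)
                  PySem.Dict.empty D.items) D.items).items = [q0, q1] := by
              rw [pv_groupFold_items D.items hnd q1.2 _
                  (pv_contains_false D.items hnd _ q1.2 (fun q hq => by
                    rw [hO1v] at hq
                    simp only [List.mem_singleton] at hq
                    rw [hq]
                    exact ⟨hmem q0 (by simp), by omega⟩)),
                hFilt, hO1v, List.filter_cons_of_neg (by simp; omega),
                List.filter_cons_of_pos (by simp), List.filter_cons_of_neg (by simp; omega),
                htnil q1.2 (by omega)]
              rfl
            have hOut : (List.foldl (fun o p => if p.2 == q2.2 then o.insert p.1 p.2 else o)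
                (List.foldl (fun o p => if p.2 == q1.2 then o.insert p.1 p.2 else o)
                  (List.foldl (fun o p => if p.2 == q0.2 then o.insert p.1 p.2 else o)
                    PySem.Dict.empty (p0 :: rest)) (p0 :: rest)) (p0 :: rest)).items
                = q0 :: q1 :: q2 :: t.takeWhile (fun p => p.2 == q2.2) := by
              rw [show (p0 :: rest) = D.items from h.symm,
                pv_groupFold_items D.items hnd q2.2 _
                  (pv_contains_false D.items hnd _ q2.2 (fun q hq => by
                    rw [hO2v] at hq
                    simp only [List.mem_cons, List.not_mem_nil, or_false] at hq
                    rcases hq with hq | hq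
                    · rw [hq]; exact ⟨hmem q0 (by simp), by omega⟩
                    · rw [hq]; exact ⟨hmem q1 (by simp), by omega⟩)),
                hFilt, hO2v, List.filter_cons_of_neg (by simp; omega),
                List.filter_cons_of_neg (by simp; omega), List.filter_cons_of_pos (by simp),
                httw]
              rfl
            exact Eq.trans (by rfl) hOut.symm
          · have hb2 : q1.2 = q2.2 := by omega
            rw [if_neg (by simp [hcb])]
            have hOut : (List.foldl (fun o p => if p.2 == q2.2 then o.insert p.1 p.2 else o)
                (List.foldl (fun o p => if p.2 == q0.2 then o.insert p.1 p.2 else o)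
                  PySem.Dict.empty (p0 :: rest)) (p0 :: rest)).items
                = q0 :: q1 :: q2 :: t.takeWhile (fun p => p.2 == q2.2) := by
              rw [show (p0 :: rest) = D.items from h.symm,
                pv_groupFold_items D.items hnd q2.2 _
                  (pv_contains_false D.items hnd _ q2.2 (fun q hq => by
                    rw [hO1v] at hq
                    simp only [List.mem_singleton] at hq
                    rw [hq]
                    exact ⟨hmem q0 (by simp), by omega⟩)),
                hFilt, hO1v, List.filter_cons_of_neg (by simp; omega),
                List.filter_cons_of_pos (by simp [hb2]), List.filter_cons_of_pos (by simp),
                httw]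
              rfl
            exact Eq.trans (by rfl) hOut.symm
      · rw [if_neg hca]
        have heq0 : q0.2 = q2.2 := by omega
        have heq1 : q1.2 = q2.2 := by omega
        have hOut : (List.foldl (fun o p => if p.2 == q2.2 then o.insert p.1 p.2 else o)
            PySem.Dict.empty (p0 :: rest)).items
            = q0 :: q1 :: q2 :: t.takeWhile (fun p => p.2 == q2.2) := by
          rw [show (p0 :: rest) = D.items from h.symm,
            pv_groupFold_items D.items hnd q2.2 PySem.Dict.empty (fun p _ _ => rfl), hFilt,
            List.filter_cons_of_pos (by simp [heq0]), List.filter_cons_of_pos (by simp [heq1]),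
            List.filter_cons_of_pos (by simp), httw]
          rfl
        exact Eq.trans (by rfl) hOut.symm

-- ===== VERDICT (by name: the statement is the Claim_ definition above) =====
theorem dict_sorter_spec : Claim_equal_dict_sorter := by
  intro my_dict _
  unfold Spec_dict_sorter
  exact dict_sorter_main my_dict
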